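-- pv_equiv track=rewrite | github.com/geeksareforlife/advent-of-code | 2019/06/puzzle2.py | getIndirects
-- ===== SOURCE A (Python) =====
-- def getIndirects(planet, directOrbits):
--
-- 	direct = directOrbits[planet]
--
-- 	if direct in directOrbits:
-- 		indirect = directOrbits[direct]
-- 		indirects = [indirect]
--
-- 		extras = getIndirects(direct, directOrbits)
-- 		if len(extras) > 0:
-- 			indirects.extend(extras)
--
-- 		return indirects
-- 	else:
-- 		return []
-- ===== SOURCE B (Python) =====
-- def getIndirects(planet, directOrbits):
--     direct = directOrbits[planet]
--     indirects = []
--     while direct in directOrbits: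
--         direct = directOrbits[direct]
--         indirects.append(direct)
--     return indirects
-- ===== Notes on version B (the rewrite author's own statement) =====
-- stated objective: simpler
-- what changed: Replaces the recursive descent (which builds a one-element list and extends it with the recursive result at every level) by a single iterative while-loop that walks the ancestor chain and appends each node.
import Mathlib
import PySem

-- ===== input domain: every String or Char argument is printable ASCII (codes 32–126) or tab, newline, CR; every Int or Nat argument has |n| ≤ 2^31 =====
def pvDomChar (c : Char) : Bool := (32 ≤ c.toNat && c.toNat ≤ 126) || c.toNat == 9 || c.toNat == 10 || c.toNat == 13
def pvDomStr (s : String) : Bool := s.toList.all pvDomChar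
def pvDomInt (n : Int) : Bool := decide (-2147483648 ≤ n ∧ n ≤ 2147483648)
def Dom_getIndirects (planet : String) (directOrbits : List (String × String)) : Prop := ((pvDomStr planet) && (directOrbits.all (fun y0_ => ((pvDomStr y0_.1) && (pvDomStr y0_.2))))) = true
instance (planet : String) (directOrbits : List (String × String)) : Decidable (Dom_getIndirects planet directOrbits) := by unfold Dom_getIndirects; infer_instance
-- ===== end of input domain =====

-- ===== PORT A =====
-- B replaces A's recursive descent by one iterative while-loop; equal on Pre_ (A raises
-- KeyError on a missing planet and recurses forever on a cyclic chain — excluded there).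

-- dict access directOrbits[k]: first-match lookup in the association list (none = KeyError)
def pvLookup? (d : List (String × String)) (k : String) : Option String :=
  match d with
  | [] => none
  | (a, b) :: t => if a == k then some b else pvLookup? t k

-- 'k in directOrbits': key membership
def pvHasKey (d : List (String × String)) (k : String) : Bool :=
  (d.map Prod.fst).contains k

-- A's recursion, made total with fuel (|directOrbits| + 1 suffices under Pre_; the
-- equivalence below holds for every fuel value, so the guard only makes A total).
def getIndirectsFuel (fuel : Nat) (planet : String) (d : List (String × String)) : List String :=
  match fuel with
  | 0 => []
  | fuel + 1 =>
    match pvLookup? d planet with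
    | none => []            -- KeyError in Python; outside Pre_
    | some direct =>
      if pvHasKey d direct then
        let indirect := (pvLookup? d direct).getD ""
        let extras := getIndirectsFuel fuel direct d
        indirect :: extras   -- indirects = [indirect]; indirects.extend(extras)
      else []

def getIndirects (planet : String) (directOrbits : List (String × String)) : List String :=
  getIndirectsFuel (directOrbits.length + 1) planet directOrbits

-- ===== PORT B =====
-- the while-loop: state = (current 'direct', accumulated 'indirects'); fuel as above
def getIndirectsLoop (fuel : Nat) (d : List (String × String)) (direct : String)
    (indirects : List String) : List String :=
  match fuel with
  | 0 => indirects
  | fuel + 1 =>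
    if pvHasKey d direct then
      let direct' := (pvLookup? d direct).getD ""
      getIndirectsLoop fuel d direct' (indirects ++ [direct'])
    else indirects

def getIndirects_alt (planet : String) (directOrbits : List (String × String)) : List String :=
  match pvLookup? directOrbits planet with
  | none => []              -- KeyError in Python; outside Pre_
  | some direct => getIndirectsLoop (directOrbits.length + 1) directOrbits direct []

-- ===== PRECONDITION & SPEC =====
-- one step along the parent chain (dict lookup; identity once outside the keys)
def pvStep (d : List (String × String)) (s : String) : String :=
  (PySem.Dict.mk d).getD s s

-- Pre_: planet is a key (else Python A raises KeyError); the parent chain from planet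
-- escapes the key set (else A recurses forever / raises RecursionError); keys are
-- distinct (duplicate keys cannot arise from a Python dict, which this list encodes).
def Pre_getIndirects (planet : String) (directOrbits : List (String × String)) : Prop :=
  planet ∈ directOrbits.map Prod.fst ∧
  (pvStep directOrbits)^[directOrbits.length + 1] planet ∉ directOrbits.map Prod.fst ∧
  (directOrbits.map Prod.fst).Nodup

instance (planet : String) (directOrbits : List (String × String)) : Decidable (Pre_getIndirects planet directOrbits) := by unfold Pre_getIndirects; infer_instance

def pvWitness_getIndirects : String × (List (String × String)) := ("B", [("B", "COM")])

def Spec_getIndirects (planet : String) (directOrbits : List (String × String)) (out : List String) : Prop := out = getIndirects_alt planet directOrbits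
instance (planet : String) (directOrbits : List (String × String)) (out : List String) : Decidable (Spec_getIndirects planet directOrbits out) := by unfold Spec_getIndirects; infer_instance

-- ===== CLAIM (what is proved, stated in full; the proofs are below) =====
def Claim_equal_getIndirects : Prop := ∀ (planet : String) (directOrbits : List (String × String)), Dom_getIndirects planet directOrbits → Pre_getIndirects planet directOrbits → Spec_getIndirects planet directOrbits (getIndirects planet directOrbits)

-- ===== LEMMAS AND PROOFS =====

-- if s is a key, lookup succeeds
theorem pvLookup_isSome (d : List (String × String)) (s : String)
    (h : pvHasKey d s = true) : ∃ v, pvLookup? d s = some v := by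
  induction d with
  | nil => simp [pvHasKey] at h
  | cons p t ih =>
    obtain ⟨a, b⟩ := p
    by_cases hp : a == s
    · exact ⟨b, by simp [pvLookup?, hp]⟩
    · have h' : pvHasKey t s = true := by
        simp only [pvHasKey, List.map_cons, List.contains_cons, Bool.or_eq_true] at h
        rcases h with h | h
        · exact absurd (by simpa using h.symm) (by simp only [beq_iff_eq] at hp; exact fun e => hp e.symm)
        · exact h
      obtain ⟨v, hv⟩ := ih h'
      exact ⟨v, by simp [pvLookup?, hp, hv]⟩

-- the loop with any accumulator = accumulator ++ the loop from []
theorem loop_acc (fuel : Nat) (d : List (String × String)) :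
    ∀ (s : String) (acc : List String),
    getIndirectsLoop fuel d s acc = acc ++ getIndirectsLoop fuel d s [] := by
  induction fuel with
  | zero => intro s acc; simp [getIndirectsLoop]
  | succ n ih =>
    intro s acc
    simp only [getIndirectsLoop]
    by_cases h : pvHasKey d s = true
    · simp only [h, if_true]
      rw [ih _ (acc ++ _), ih _ ([] ++ _)]
      simp
    · simp [h]

-- core invariant: A's recursion from a key s equals the loop started at s's parent
theorem rec_eq_loop (d : List (String × String)) :
    ∀ (fuel : Nat) (s : String), pvHasKey d s = true →
    getIndirectsFuel fuel s d
      = getIndirectsLoop fuel d ((pvLookup? d s).getD "") [] := by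
  intro fuel
  induction fuel with
  | zero => intro s _; simp [getIndirectsFuel, getIndirectsLoop]
  | succ n ih =>
    intro s hs
    obtain ⟨v, hv⟩ := pvLookup_isSome d s hs
    simp only [getIndirectsFuel, getIndirectsLoop, hv, Option.getD_some]
    by_cases hk : pvHasKey d v = true
    · simp only [hk, if_true]
      simp only [List.nil_append]
      rw [ih v hk, loop_acc n d ((pvLookup? d v).getD "") [(pvLookup? d v).getD ""]]
      simp
    · simp [hk]

theorem getIndirects_spec : Claim_equal_getIndirects := by
  intro planet d _ _
  unfold Spec_getIndirects getIndirects getIndirects_alt getIndirectsFuel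
  cases hl : pvLookup? d planet with
  | none => rfl
  | some direct =>
    simp only [getIndirectsLoop]
    by_cases hk : pvHasKey d direct = true
    · simp only [hk, if_true]
      simp only [List.nil_append]
      rw [rec_eq_loop d d.length direct hk,
        loop_acc d.length d ((pvLookup? d direct).getD "") [(pvLookup? d direct).getD ""]]
      simp
    · simp [hk]
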